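-- pv_equiv track=rewrite | github.com/gaxmann/suhr | langs.py | split_with_nl
-- ===== SOURCE A (Python) =====
-- card_newline='\u241e'
--
-- def split_with_nl(text):
--     # text=text[:200]
--     words = []
--     for line in text.split('\n'):
--         # Zerlege jede Zeile normal in Wörter
--         parts = line.split()
--         words.extend(parts)
--         # Nach jeder Zeile (außer der letzten) ein Zeilenumbruch-Zeichen einfügen
--         words.append(card_newline)
--     if words and words[-1] == card_newline:
--         words.pop()  # letzten Trenner entfernen, falls er auf leere letzte Zeile zurückgeht
--     return words
-- ===== SOURCE B (Python) =====
-- card_newline='\u241e'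
--
-- def split_with_nl(text):
--     # Replace each newline with a space-padded marker token, then split once on whitespace.
--     return text.replace('\n', ' ' + card_newline + ' ').split()
-- ===== Notes on version B (the rewrite author's own statement) =====
-- stated objective: idiomatic
-- what changed: B replaces the explicit line loop with list accumulation and trailing-marker pop by a single replace of each newline with a space-padded marker followed by one whitespace split.
import Mathlib
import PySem

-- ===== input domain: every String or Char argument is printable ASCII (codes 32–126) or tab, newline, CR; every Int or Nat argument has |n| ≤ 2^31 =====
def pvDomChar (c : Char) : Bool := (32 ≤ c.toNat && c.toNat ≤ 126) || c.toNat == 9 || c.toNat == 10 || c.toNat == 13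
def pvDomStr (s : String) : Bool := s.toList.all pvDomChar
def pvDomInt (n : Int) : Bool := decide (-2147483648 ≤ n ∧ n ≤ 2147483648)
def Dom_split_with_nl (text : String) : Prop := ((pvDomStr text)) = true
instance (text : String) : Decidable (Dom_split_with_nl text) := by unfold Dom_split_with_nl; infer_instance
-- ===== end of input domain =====

-- B replaces A's explicit per-line loop (extend words, append marker, pop trailing marker) by one
-- replace of '\n' with a space-padded marker followed by a single whitespace split (idiomatic).

-- ===== PORT A =====
def cardNewline : String := "\u241E"

def split_with_nl (text : String) : List String :=
  -- words = []; for line in text.split('\n'): words.extend(line.split()); words.append(card_newline)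
  let words := (PySem.Chars.splitOn text.toList ['\n']).foldl
      (fun words line => (words ++ PySem.Str.split₀ (String.ofList line)) ++ [cardNewline]) []
  -- if words and words[-1] == card_newline: words.pop()
  if words.getLast? = some cardNewline then words.dropLast else words

-- ===== PORT B =====
def split_with_nl_alt (text : String) : List String :=
  -- text.replace('\n', ' ' + card_newline + ' ').split()
  PySem.Str.split₀ (PySem.Str.replace text "\n" " \u241E ")

-- ===== PRECONDITION & SPEC =====
def Spec_split_with_nl (text : String) (out : List String) : Prop := out = split_with_nl_alt text
instance (text : String) (out : List String) : Decidable (Spec_split_with_nl text out) := by unfold Spec_split_with_nl; infer_instance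

-- ===== CLAIM (what is proved, stated in full; the proofs are below) =====
def Claim_equal_split_with_nl : Prop := ∀ (text : String), Dom_split_with_nl text → Spec_split_with_nl text (split_with_nl text)

-- ===== LEMMAS AND PROOFS =====

-- the space-padded marker B inserts, as a char list
def pvSep : List Char := [' ', '\u241E', ' ']

-- what text.replace('\n', pvSep) computes, structurally
def pvRepl : List Char → List Char
  | [] => []
  | c :: t => if c = '\n' then ' ' :: '\u241E' :: ' ' :: pvRepl t else c :: pvRepl t

-- what text.split('\n') computes, structurally (cur = current piece, reversed)
def pvLines : List Char → List Char → List (List Char)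
  | [], cur => [cur.reverse]
  | c :: rest, cur => if c = '\n' then cur.reverse :: pvLines rest [] else pvLines rest (c :: cur)

lemma replace_go_eq (fuel : Nat) : ∀ (l acc : List Char), l.length ≤ fuel →
    PySem.Chars.replace.go ['\n'] pvSep fuel l acc = acc.reverse ++ pvRepl l := by
  induction fuel with
  | zero =>
    intro l acc h
    have : l = [] := List.eq_nil_of_length_eq_zero (Nat.le_zero.mp h)
    subst this
    simp [PySem.Chars.replace.go, pvRepl]
  | succ n ih =>
    intro l acc h
    cases l with
    | nil => simp [PySem.Chars.replace.go, pvRepl]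
    | cons c t =>
      have hlen : t.length ≤ n := by simpa using h
      by_cases hc : c = '\n'
      · subst hc
        simp only [PySem.Chars.replace.go, List.isPrefixOf,
          beq_self_eq_true, Bool.true_and, if_true, List.length_cons, List.drop_succ_cons,
          List.length_nil, List.drop_zero]
        rw [ih t _ hlen]
        simp [pvRepl, pvSep]
      · have hbe : ('\n' == c) = false := beq_eq_false_iff_ne.mpr (Ne.symm hc)
        simp only [PySem.Chars.replace.go, List.isPrefixOf, hbe, Bool.false_and]
        rw [ih t _ hlen]
        simp [pvRepl, hc]

lemma replace_eq (cs : List Char) :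
    PySem.Chars.replace cs ['\n'] pvSep = pvRepl cs := by
  unfold PySem.Chars.replace
  simp only [List.isEmpty]
  exact (replace_go_eq cs.length cs [] le_rfl).trans (by simp)

lemma splitOn_go_eq (fuel : Nat) : ∀ (l cur : List Char) (acc : List (List Char)), l.length < fuel →
    PySem.Chars.splitOn.go ['\n'] fuel l cur acc = acc.reverse ++ pvLines l cur := by
  induction fuel with
  | zero => intro l cur acc h; exact absurd h (Nat.not_lt_zero _)
  | succ n ih =>
    intro l cur acc h
    cases l with
    | nil => simp [PySem.Chars.splitOn.go, pvLines]
    | cons c t =>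
      have hlen : t.length < n := by simpa using h
      by_cases hc : c = '\n'
      · subst hc
        simp only [PySem.Chars.splitOn.go, List.isPrefixOf,
          beq_self_eq_true, Bool.true_and, if_true, List.length_cons, List.drop_succ_cons,
          List.length_nil, List.drop_zero]
        rw [ih t [] _ hlen]
        simp [pvLines]
      · have hbe : ('\n' == c) = false := beq_eq_false_iff_ne.mpr (Ne.symm hc)
        simp only [PySem.Chars.splitOn.go, List.isPrefixOf, hbe, Bool.false_and]
        rw [ih t (c :: cur) _ hlen]
        simp [pvLines, hc]

lemma splitOn_eq (cs : List Char) :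
    PySem.Chars.splitOn cs ['\n'] = pvLines cs [] := by
  unfold PySem.Chars.splitOn
  exact (splitOn_go_eq (cs.length + 1) cs [] [] (by omega)).trans (by simp)

lemma pvLines_ne_nil (l cur : List Char) : pvLines l cur ≠ [] := by
  cases l with
  | nil => simp [pvLines]
  | cons c rest =>
    simp only [pvLines]
    split_ifs
    · simp
    · exact pvLines_ne_nil rest (c :: cur)

lemma join_pvLines : ∀ (l cur : List Char),
    PySem.Chars.join pvSep (pvLines l cur) = cur.reverse ++ pvRepl l := by
  intro l
  induction l with
  | nil => intro cur; simp [pvLines, pvRepl, PySem.Chars.join_singleton]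
  | cons c rest ih =>
    intro cur
    by_cases hc : c = '\n'
    · subst hc
      simp only [pvLines, if_true]
      obtain ⟨q, qs, hq⟩ := List.exists_cons_of_ne_nil (pvLines_ne_nil rest [])
      rw [hq, PySem.Chars.join_cons_cons, ← hq, ih []]
      simp [pvRepl, pvSep]
    · simp only [pvLines, hc, if_false]
      rw [ih (c :: cur)]
      simp [pvRepl, hc]

lemma split_go_acc : ∀ (l cur : List Char) (acc : List (List Char)),
    PySem.Chars.split₀.go l cur acc = acc.reverse ++ PySem.Chars.split₀.go l cur [] := by
  intro l
  induction l with
  | nil =>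
    intro cur acc
    simp only [PySem.Chars.split₀.go]
    split_ifs <;> simp
  | cons c rest ih =>
    intro cur acc
    simp only [PySem.Chars.split₀.go]
    split_ifs with h1 h2
    · exact ih [] acc
    · rw [ih [] (cur.reverse :: acc), ih [] [cur.reverse]]
      simp
    · exact ih (c :: cur) acc

lemma split_go_space : ∀ (a b cur : List Char),
    PySem.Chars.split₀.go (a ++ ' ' :: b) cur [] = PySem.Chars.split₀.go a cur [] ++ PySem.Chars.split₀.go b [] [] := by
  intro a
  induction a with
  | nil =>
    intro b cur
    simp only [List.nil_append, PySem.Chars.split₀.go]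
    have : PySem.Chars.isspace ' ' = true := by decide
    rw [this]
    simp only [if_true]
    by_cases h : cur.isEmpty
    · simp [h]
    · rw [if_neg (by simp [h]), split_go_acc b [] [cur.reverse]]
      simp [h]
  | cons c a' ih =>
    intro b cur
    simp only [List.cons_append, PySem.Chars.split₀.go]
    split_ifs with h1 h2
    · exact ih b []
    · rw [split_go_acc (a' ++ ' ' :: b) [] [cur.reverse], split_go_acc a' [] [cur.reverse], ih b []]
      simp
    · exact ih b (c :: cur)

lemma split₀_space (a b : List Char) :
    PySem.Chars.split₀ (a ++ ' ' :: b) = PySem.Chars.split₀ a ++ PySem.Chars.split₀ b := by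
  unfold PySem.Chars.split₀
  exact split_go_space a b []

lemma split₀_marker (x : List Char) :
    PySem.Chars.split₀ ('\u241E' :: ' ' :: x) = ['\u241E'] :: PySem.Chars.split₀ x := by
  have h := split₀_space ['\u241E'] x
  simpa using h

lemma split₀_join : ∀ (ls : List (List Char)), ls ≠ [] →
    PySem.Chars.split₀ (PySem.Chars.join pvSep ls) ++ [['\u241E']]
      = ls.flatMap (fun l => PySem.Chars.split₀ l ++ [['\u241E']]) := by
  intro ls
  induction ls with
  | nil => intro h; exact absurd rfl h
  | cons l rest ih =>
    intro _
    cases rest with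
    | nil => simp [PySem.Chars.join_singleton]
    | cons l2 rest2 =>
      have hsep : l ++ pvSep ++ PySem.Chars.join pvSep (l2 :: rest2)
          = l ++ ' ' :: ('\u241E' :: ' ' :: PySem.Chars.join pvSep (l2 :: rest2)) := by
        simp [pvSep]
      rw [PySem.Chars.join_cons_cons, hsep, split₀_space, split₀_marker, List.flatMap_cons,
        ← ih (by simp)]
      simp

lemma foldl_words (ls : List (List Char)) (acc : List String) :
    ls.foldl (fun words line => (words ++ PySem.Str.split₀ (String.ofList line)) ++ [cardNewline]) acc
      = acc ++ ls.flatMap (fun l => PySem.Str.split₀ (String.ofList l) ++ [cardNewline]) := by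
  have h := PySem.List.foldl_append_eq_flatMap (fun l => PySem.Str.split₀ (String.ofList l) ++ [cardNewline]) ls acc
  simpa [List.append_assoc] using h

lemma getLast_flatMap {α β : Type} (f : α → List β) (c : β) :
    ∀ (ls : List α), ls ≠ [] → (ls.flatMap (fun l => f l ++ [c])).getLast? = some c := by
  intro ls
  induction ls with
  | nil => intro h; exact absurd rfl h
  | cons l rest ih =>
    intro _
    cases rest with
    | nil => simp
    | cons l2 rest2 =>
      rw [List.flatMap_cons, List.getLast?_append, ih (by simp)]
      simp

-- ===== VERDICT (by name: the statement is the Claim_ definition above) =====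
theorem split_with_nl_spec : Claim_equal_split_with_nl := by
  intro text _
  unfold Spec_split_with_nl split_with_nl split_with_nl_alt
  rw [splitOn_eq, foldl_words, List.nil_append,
    if_pos (getLast_flatMap (fun l => PySem.Str.split₀ (String.ofList l)) cardNewline _
      (pvLines_ne_nil _ _))]
  refine List.map_injective_iff.mpr (fun a b hab => String.toList_inj.mp hab) ?_
  have hnl : ("\n" : String).toList = ['\n'] := by decide
  have hsep : (" \u241E " : String).toList = pvSep := by decide
  have hcard : cardNewline.toList = ['\u241E'] := by decide
  rw [PySem.Str.split₀_map_toList, PySem.Str.toList_replace, hnl, hsep, replace_eq]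
  have hjoin := join_pvLines text.toList []
  rw [List.reverse_nil, List.nil_append] at hjoin
  rw [← hjoin]
  have h := split₀_join (pvLines text.toList []) (pvLines_ne_nil _ _)
  have h2 : PySem.Chars.split₀ (PySem.Chars.join pvSep (pvLines text.toList []))
      = ((pvLines text.toList []).flatMap (fun l => PySem.Chars.split₀ l ++ [['\u241E']])).dropLast := by
    rw [← h, List.dropLast_concat]
  rw [h2, List.map_dropLast, List.map_flatMap]
  refine congrArg List.dropLast (List.flatMap_congr (fun l _ => ?_))
  simp [hcard, PySem.Str.split₀_map_toList]
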